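-- pv_equiv track=rewrite | github.com/MagicPants/Project-Euler | python/Problem_2.py | fibonacci_sequence_calculator
-- ===== SOURCE A (Python) =====
-- def fibonacci_sequence_calculator(max):
--     seq = [0, 1]
--     ans = 0
--     i = 1
--     while ans <= max:
--         seq.append(seq[i] + seq[i - 1])
--
--         if seq[i] % 2 == 0:
--             ans += seq[i]
--
--         i += 1
--     return ans
-- ===== SOURCE B (Python) =====
-- def fibonacci_sequence_calculator(max):
--     ans = 0
--     a, b = 2, 8
--     while ans <= max:
--         ans += a
--         a, b = b, 4 * b + a
--     return ans
-- ===== Notes on version B (the rewrite author's own statement) =====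
-- stated objective: simpler
-- what changed: B drops the growing Fibonacci list and the parity test, iterating only the even Fibonacci terms via their own second-order recurrence while accumulating the same running sum with the same stopping rule.
import Mathlib
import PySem

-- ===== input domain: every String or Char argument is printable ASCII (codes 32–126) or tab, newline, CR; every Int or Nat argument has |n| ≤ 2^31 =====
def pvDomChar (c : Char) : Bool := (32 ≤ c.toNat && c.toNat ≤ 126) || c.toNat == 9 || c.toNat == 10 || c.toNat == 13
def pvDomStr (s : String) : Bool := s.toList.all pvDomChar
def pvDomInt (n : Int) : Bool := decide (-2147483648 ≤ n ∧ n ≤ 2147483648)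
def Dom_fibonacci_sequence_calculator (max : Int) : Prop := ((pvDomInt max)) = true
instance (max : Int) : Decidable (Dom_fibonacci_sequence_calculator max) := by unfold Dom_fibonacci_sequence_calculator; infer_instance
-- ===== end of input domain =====

-- B drops the Fibonacci list and the parity test, iterating only the even Fibonacci numbers
-- (E_n = 4*E_{n-1} + E_{n-2}, starting 2, 8) with the same running sum and stopping rule (simpler).


-- ===== PORT A =====
-- A's while loop, step for step, with a fuel parameter only to make it total in Lean.
-- 300 iterations are far more than enough for any |max| ≤ 2^31 (ans grows past 2^31
-- within ~48 iterations), and the equivalence proof holds for every fuel pairing 3n/n.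
-- seq[i] / seq[i-1] are always in range in A (i = seq.length - 1 at the loop head),
-- so List.getD _ 0 is exactly Python's indexing here.
def fibLoopA (fuel : Nat) (max : Int) (seq : List Int) (ans : Int) (i : Nat) : Int :=
  match fuel with
  | 0 => ans
  | f + 1 =>
    if ans ≤ max then
      let seq' := seq ++ [seq.getD i 0 + seq.getD (i - 1) 0]
      if seq'.getD i 0 % 2 == 0 then
        fibLoopA f max seq' (ans + seq'.getD i 0) (i + 1)
      else
        fibLoopA f max seq' ans (i + 1)
    else ans

def fibonacci_sequence_calculator (max : Int) : Int :=
  fibLoopA 300 max [0, 1] 0 1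

-- ===== PORT B =====
-- B's while loop over even Fibonacci numbers only (same fuel remark; 100 suffices on Dom).
def fibLoopB (fuel : Nat) (max a b ans : Int) : Int :=
  match fuel with
  | 0 => ans
  | f + 1 =>
    if ans ≤ max then fibLoopB f max b (4 * b + a) (ans + a) else ans

def fibonacci_sequence_calculator_alt (max : Int) : Int :=
  fibLoopB 100 max 2 8 0

-- ===== PRECONDITION & SPEC =====
def Spec_fibonacci_sequence_calculator (max : Int) (out : Int) : Prop := out = fibonacci_sequence_calculator_alt max
instance (max : Int) (out : Int) : Decidable (Spec_fibonacci_sequence_calculator max out) := by unfold Spec_fibonacci_sequence_calculator; infer_instance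

-- ===== CLAIM (what is proved, stated in full; the proofs are below) =====
def Claim_equal_fibonacci_sequence_calculator : Prop := ∀ (max : Int), Dom_fibonacci_sequence_calculator max → Spec_fibonacci_sequence_calculator max (fibonacci_sequence_calculator max)

-- ===== LEMMAS AND PROOFS =====

-- A's loop only ever looks at the last two elements of seq (i = seq.length - 1).
def fibAbs (fuel : Nat) (max p q ans : Int) : Int :=
  match fuel with
  | 0 => ans
  | f + 1 =>
    if ans ≤ max then
      if q % 2 == 0 then fibAbs f max q (p + q) (ans + q)
      else fibAbs f max q (p + q) ans
    else ans

lemma getD_snoc2_left (front : List Int) (p q : Int) :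
    (front ++ [p, q]).getD front.length 0 = p := by
  simp [List.getD_eq_getElem?_getD]

lemma getD_snoc2_right (front : List Int) (p q : Int) :
    (front ++ [p, q]).getD (front.length + 1) 0 = q := by
  simp [List.getD_eq_getElem?_getD]

lemma loopA_abs (fuel : Nat) (max : Int) :
    ∀ (front : List Int) (p q ans : Int),
      fibLoopA fuel max (front ++ [p, q]) ans (front.length + 1)
        = fibAbs fuel max p q ans := by
  induction fuel with
  | zero => intro front p q ans; rfl
  | succ f ih =>
    intro front p q ans
    show (if ans ≤ max then _ else ans) = (if ans ≤ max then _ else ans)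
    by_cases h : ans ≤ max
    · simp only [h, if_true]
      have h1 : (front ++ [p, q]).getD (front.length + 1) 0 = q :=
        getD_snoc2_right front p q
      have h2 : (front ++ [p, q]).getD (front.length + 1 - 1) 0 = p :=
        getD_snoc2_left front p q
      have h3 : (front ++ [p, q] ++ [q + p]).getD (front.length + 1) 0 = q := by
        have h := getD_snoc2_left (front ++ [p]) q (q + p)
        simp only [List.append_assoc, List.length_append, List.length_cons,
          List.length_nil, List.cons_append, List.nil_append] at h ⊢
        exact h
      simp only [h1, h2, h3]
      have hre : front ++ [p, q] ++ [q + p] = (front ++ [p]) ++ [q, q + p] := by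
        simp [List.append_assoc]
      have hlen : front.length + 1 + 1 = (front ++ [p]).length + 1 := by simp
      by_cases hq : q % 2 == 0
      · simp only [hq, if_true, hre, hlen, ih]
        have : q + p = p + q := by ring
        rw [this]
      · simp only [hq, hre, hlen, ih]
        have : q + p = p + q := by ring
        rw [this]
    · simp [h]

lemma fibAbs_succ (f : Nat) (max p q ans : Int) :
    fibAbs (f + 1) max p q ans
      = (if ans ≤ max then
          if q % 2 == 0 then fibAbs f max q (p + q) (ans + q)
          else fibAbs f max q (p + q) ans
        else ans) := rfl

lemma fibLoopB_succ (f : Nat) (max a b ans : Int) :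
    fibLoopB (f + 1) max a b ans
      = (if ans ≤ max then fibLoopB f max b (4 * b + a) (ans + a) else ans) := rfl

-- Three steps of A's loop (odd, odd, even Fibonacci term) equal one step of B's loop.
lemma abs_eq_loopB (max : Int) :
    ∀ (n : Nat) (p q ans : Int), p % 2 = 0 → q % 2 = 1 →
      fibAbs (3 * n) max p q ans
        = fibLoopB n max (p + 2 * q) (4 * (p + 2 * q) + p) ans := by
  intro n
  induction n with
  | zero => intro p q ans _ _; rfl
  | succ n ih =>
    intro p q ans hp hq
    have e3 : 3 * (n + 1) = (3 * n) + 1 + 1 + 1 := by ring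
    have c1 : (q % 2 == 0) = false := by simp [hq]
    have c2 : ((p + q) % 2 == 0) = false := by
      have h2 : (p + q) % 2 = 1 := by omega
      simp [h2]
    have c3 : ((q + (p + q)) % 2 == 0) = true := by
      have h3 : (q + (p + q)) % 2 = 0 := by omega
      simp [h3]
    rw [e3]
    simp only [fibAbs_succ, fibLoopB_succ, c1, c2, c3, Bool.false_eq_true, if_false, if_true]
    by_cases h : ans ≤ max
    · simp only [h, if_true]
      have hp' : (q + (p + q)) % 2 = 0 := by omega
      have hq' : (p + q + (q + (p + q))) % 2 = 1 := by omega
      rw [ih _ _ _ hp' hq']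
      congr 1 <;> ring
    · simp [h]

-- ===== VERDICT (by name: the statement is the Claim_ definition above) =====
theorem fibonacci_sequence_calculator_spec : Claim_equal_fibonacci_sequence_calculator := by
  intro max _
  show fibonacci_sequence_calculator max = fibonacci_sequence_calculator_alt max
  have h0 : fibonacci_sequence_calculator max = fibLoopA 300 max (([] : List Int) ++ [0, 1]) 0 (([] : List Int).length + 1) := rfl
  rw [h0, loopA_abs]
  have h1 : (300 : Nat) = 3 * 100 := by norm_num
  rw [h1, abs_eq_loopB max 100 0 1 0 (by norm_num) (by norm_num)]
  norm_num [fibonacci_sequence_calculator_alt]
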